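-- pv_equiv track=rewrite | github.com/jls83/reconciliation | reconciliation.py | reconcile_positions_2
-- ===== SOURCE A (Python) =====
-- def reconcile_positions_2(pos_dict_1, pos_dict_2):
--     res = {}
--
--     dict_1_keys = set(pos_dict_1.keys())
--     dict_2_keys = set(pos_dict_2.keys())
--
--     left_keys = dict_1_keys.difference(dict_2_keys) # stuff i have that wasn't reported
--     middle_keys = dict_1_keys.intersection(dict_2_keys) # stuff i have that was reported
--     right_keys = dict_2_keys.difference(dict_1_keys) # stuff i don't have that was reported
--
--     for symbol in left_keys:
--         symbol_diff = pos_dict_1[symbol] * -1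
--         if symbol_diff != 0:
--             res[symbol] = symbol_diff
--
--     for symbol in middle_keys:
--         symbol_diff = pos_dict_2[symbol] - pos_dict_1[symbol]
--         if symbol_diff != 0:
--             res[symbol] = symbol_diff
--
--     for symbol in right_keys:
--         symbol_diff = pos_dict_2[symbol]
--         if symbol_diff != 0:
--             res[symbol] = symbol_diff
--
--     return res
-- ===== SOURCE B (Python) =====
-- def reconcile_positions_2(pos_dict_1, pos_dict_2):
--     # Consume a shrinking copy of pos_dict_2: each of my symbols pops its
--     # reported quantity out of the copy (no key sets, no set algebra, no
--     # membership tests); whatever is left over afterwards is exactly the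
--     # reported-but-not-held remainder.  Differences are collected as pair
--     # lists and turned into a dict once at the end.
--     remaining = dict(pos_dict_2)
--     unreported, changed = [], []
--     for symbol, qty in pos_dict_1.items():
--         reported = remaining.pop(symbol, None)
--         if reported is None:
--             if qty != 0:
--                 unreported.append((symbol, -qty))
--         elif reported != qty:
--             changed.append((symbol, reported - qty))
--     surplus = [(s, q) for s, q in remaining.items() if q != 0]
--     return dict(unreported + changed + surplus)
-- ===== Notes on version B (the rewrite author's own statement) =====
-- stated objective: alternative
-- what changed: Instead of building two key sets and running three loops over their difference/intersection/difference partitions, B consumes a shrinking copy of pos_dict_2 (dict.pop with default) in a single pass over pos_dict_1 -- the reported-only symbols fall out as the unconsumed remainder rather than being computed by set algebra -- and collects the differences as pair lists that are turned into a dict once at the end.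
import Mathlib
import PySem

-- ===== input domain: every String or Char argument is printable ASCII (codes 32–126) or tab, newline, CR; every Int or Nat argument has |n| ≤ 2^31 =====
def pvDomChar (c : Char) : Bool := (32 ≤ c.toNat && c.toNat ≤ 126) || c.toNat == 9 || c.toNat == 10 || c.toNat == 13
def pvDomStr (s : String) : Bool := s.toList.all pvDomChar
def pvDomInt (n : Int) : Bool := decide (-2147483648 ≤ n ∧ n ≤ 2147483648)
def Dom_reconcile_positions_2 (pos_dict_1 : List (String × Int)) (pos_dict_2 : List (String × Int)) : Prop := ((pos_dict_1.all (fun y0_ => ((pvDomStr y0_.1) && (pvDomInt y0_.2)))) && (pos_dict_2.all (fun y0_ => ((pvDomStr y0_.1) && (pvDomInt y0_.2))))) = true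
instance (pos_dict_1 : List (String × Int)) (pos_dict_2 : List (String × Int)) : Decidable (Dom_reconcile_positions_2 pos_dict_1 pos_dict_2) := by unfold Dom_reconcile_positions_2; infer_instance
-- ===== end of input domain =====

-- B replaces A's key sets and three set-partitioned loops by a single pass over pos_dict_1
-- that pops each symbol out of a shrinking copy of pos_dict_2 (the reported-only symbols are
-- the unconsumed remainder), collecting differences as pair lists merged into one dict at the
-- end (objective: alternative). The returned dict's insertion order in Python is set-hash
-- order; ports use first-insertion order, dict outputs are compared ignoring order.

-- ===== PORT A =====
def reconcile_positions_2 (pos_dict_1 : List (String × Int)) (pos_dict_2 : List (String × Int)) : List (String × Int) :=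
  let md1 : PySem.Dict String Int := PySem.Dict.mk pos_dict_1
  let md2 : PySem.Dict String Int := PySem.Dict.mk pos_dict_2
  let res : PySem.Dict String Int := PySem.Dict.empty
  let dict_1_keys : PySem.Set String := PySem.Set.ofList md1.keys
  let dict_2_keys : PySem.Set String := PySem.Set.ofList md2.keys
  let left_keys := PySem.Set.diff dict_1_keys dict_2_keys
  let middle_keys := PySem.Set.inter dict_1_keys dict_2_keys
  let right_keys := PySem.Set.diff dict_2_keys dict_1_keys
  let res := left_keys.foldl (fun res symbol =>
    let symbol_diff := md1.getD symbol 0 * (-1)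
    if symbol_diff ≠ 0 then res.insert symbol symbol_diff else res) res
  let res := middle_keys.foldl (fun res symbol =>
    let symbol_diff := md2.getD symbol 0 - md1.getD symbol 0
    if symbol_diff ≠ 0 then res.insert symbol symbol_diff else res) res
  let res := right_keys.foldl (fun res symbol =>
    let symbol_diff := md2.getD symbol 0
    if symbol_diff ≠ 0 then res.insert symbol symbol_diff else res) res
  res.items

-- ===== PORT B =====
-- loop body of B's single pass: state = (remaining copy of pos_dict_2, unreported, changed);
-- 'remaining.pop(symbol, None)' = get? then erase on a hit.
def pvStep (st : PySem.Dict String Int × List (String × Int) × List (String × Int))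
    (p : String × Int) : PySem.Dict String Int × List (String × Int) × List (String × Int) :=
  match st.1.get? p.1 with
  | none => if p.2 ≠ 0 then (st.1, st.2.1 ++ [(p.1, -p.2)], st.2.2) else st
  | some reported =>
      if reported ≠ p.2 then (st.1.erase p.1, st.2.1, st.2.2 ++ [(p.1, reported - p.2)])
      else (st.1.erase p.1, st.2.1, st.2.2)

def reconcile_positions_2_alt (pos_dict_1 : List (String × Int)) (pos_dict_2 : List (String × Int)) : List (String × Int) :=
  let remaining : PySem.Dict String Int := PySem.Dict.mk pos_dict_2
  let st := pos_dict_1.foldl pvStep (remaining, [], [])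
  let surplus := st.1.items.filter (fun p => p.2 != 0)
  (PySem.Dict.ofList (st.2.1 ++ st.2.2 ++ surplus)).items

-- ===== PRECONDITION & SPEC =====
-- Pre_ excludes association lists with duplicate keys: those do not represent a Python
-- dict (dict keys are unique), so neither Python function ever receives them.
def Pre_reconcile_positions_2 (pos_dict_1 : List (String × Int)) (pos_dict_2 : List (String × Int)) : Prop :=
  (pos_dict_1.map (·.1)).Nodup ∧ (pos_dict_2.map (·.1)).Nodup
instance (pos_dict_1 : List (String × Int)) (pos_dict_2 : List (String × Int)) : Decidable (Pre_reconcile_positions_2 pos_dict_1 pos_dict_2) := by unfold Pre_reconcile_positions_2; infer_instance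
def pvWitness_reconcile_positions_2 : (List (String × Int)) × (List (String × Int)) :=
  ([("AAPL", 3), ("GME", 0), ("TSLA", -2)], [("AAPL", 5), ("IBM", 7)])

def Spec_reconcile_positions_2 (pos_dict_1 : List (String × Int)) (pos_dict_2 : List (String × Int)) (out : List (String × Int)) : Prop := out = reconcile_positions_2_alt pos_dict_1 pos_dict_2
instance (pos_dict_1 : List (String × Int)) (pos_dict_2 : List (String × Int)) (out : List (String × Int)) : Decidable (Spec_reconcile_positions_2 pos_dict_1 pos_dict_2 out) := by unfold Spec_reconcile_positions_2; infer_instance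

-- ===== CLAIM (what is proved, stated in full; the proofs are below) =====
def Claim_equal_reconcile_positions_2 : Prop := ∀ (pos_dict_1 : List (String × Int)) (pos_dict_2 : List (String × Int)), Dom_reconcile_positions_2 pos_dict_1 pos_dict_2 → Pre_reconcile_positions_2 pos_dict_1 pos_dict_2 → Spec_reconcile_positions_2 pos_dict_1 pos_dict_2 (reconcile_positions_2 pos_dict_1 pos_dict_2)

-- ===== LEMMAS AND PROOFS =====
lemma contains_mk_eq_contains_keys (ps : List (String × Int)) (k : String) :
    (PySem.Dict.mk ps).contains k = (ps.map (·.1)).contains k := by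
  simp only [PySem.Dict.contains_mk, List.contains_eq_any_beq, List.any_map]
  congr 1; funext p; simp only [Function.comp]; exact (BEq.comm ..)

lemma items_foldl_insertIf (f : String → Int) (ks : List String) (d : PySem.Dict String Int)
    (hnd : ks.Nodup) (hf : ∀ k ∈ ks, d.contains k = false) :
    (ks.foldl (fun res k => if f k ≠ 0 then res.insert k (f k) else res) d).items
      = d.items ++ (ks.filter (fun k => decide (f k ≠ 0))).map (fun k => (k, f k)) := by
  induction ks generalizing d with
  | nil => simp
  | cons k ks ih =>
    simp only [List.foldl_cons, List.filter_cons]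
    have hk : d.contains k = false := hf k (by simp)
    have hnd' : ks.Nodup := hnd.of_cons
    have hne : k ∉ ks := (List.nodup_cons.mp hnd).1
    by_cases h : f k ≠ 0
    · rw [if_pos h, ih _ hnd' ?fresh]
      · simp [h, PySem.Dict.items_insert_of_not_contains d _ hk]
      case fresh =>
        intro k' hk'
        rw [PySem.Dict.contains_insert]
        have : (k' == k) = false := by simp; rintro rfl; exact hne hk'
        simp [this, hf k' (by simp [hk'])]
    · rw [if_neg h, ih _ hnd' (fun k' hk' => hf k' (by simp [hk']))]
      simp at h
      simp [h]

lemma contains_foldl_insertIf (f : String → Int) (ks : List String) (d : PySem.Dict String Int)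
    (hnd : ks.Nodup) (hf : ∀ k ∈ ks, d.contains k = false) (a : String) :
    (ks.foldl (fun res k => if f k ≠ 0 then res.insert k (f k) else res) d).contains a
      = (d.contains a || decide (a ∈ ks.filter (fun k => decide (f k ≠ 0)))) := by
  rw [PySem.Dict.contains_eq_decide_mem_keys, PySem.Dict.keys, items_foldl_insertIf f ks d hnd hf]
  rw [PySem.Dict.contains_eq_decide_mem_keys, PySem.Dict.keys]
  rw [Bool.eq_iff_iff]
  simp only [Function.comp_def, List.map_append, List.map_map, List.mem_append, List.mem_filter,
    decide_eq_true_eq, Bool.or_eq_true, Bool.and_eq_true, Bool.not_eq_true', decide_eq_false_iff_not,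
    List.map_id_fun', id, List.mem_filter]

lemma items_update_fresh (d : PySem.Dict String Int) (l : List (String × Int))
    (hfresh : ∀ a ∈ l, d.contains a.1 = false) (hnd : (l.map (·.1)).Nodup) :
    (d.update l).items = d.items ++ l := by
  have h := PySem.Dict.items_foldl_insert_fresh l (fun p : String × Int => p.1) (fun p => p.2) d hfresh hnd
  simpa [PySem.Dict.update] using h

lemma get?_erase_of_ne (d : PySem.Dict String Int) (k k' : String) (h : k' ≠ k) :
    (d.erase k).get? k' = d.get? k' := by
  simp only [PySem.Dict.get?, PySem.Dict.erase]
  congr 1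
  induction d.items with
  | nil => rfl
  | cons p t ih =>
    by_cases hp : (p.1 == k) = true
    · have hk' : (p.1 == k') = false := by
        rw [beq_iff_eq] at hp
        simp only [beq_eq_false_iff_ne, ne_eq, hp]
        exact fun e => h e.symm
      simp [List.filter_cons, hp, List.find?_cons, hk', ih]
    · by_cases hq : (p.1 == k') = true
      · simp [List.filter_cons, hp, List.find?_cons, hq]
      · simp [List.filter_cons, hp, List.find?_cons, hq, ih]

lemma contains_erase_of_ne (d : PySem.Dict String Int) (k k' : String) (h : k' ≠ k) :
    (d.erase k).contains k' = d.contains k' := by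
  rw [PySem.Dict.contains_eq_isSome_get?, PySem.Dict.contains_eq_isSome_get?,
    get?_erase_of_ne d k k' h]

lemma getD_erase_of_ne (d : PySem.Dict String Int) (k k' : String) (v : Int) (h : k' ≠ k) :
    (d.erase k).getD k' v = d.getD k' v := by
  rw [PySem.Dict.getD_eq_get?_getD, PySem.Dict.getD_eq_get?_getD, get?_erase_of_ne d k k' h]

-- Characterisation of B's single pass: after folding pvStep over l (distinct keys),
-- the remainder is rem minus l's keys, unreported/changed got l's misses/hits appended.
lemma b_fold (l : List (String × Int)) (hn : (l.map (·.1)).Nodup)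
    (rem : PySem.Dict String Int) (u c : List (String × Int)) :
    l.foldl pvStep (rem, u, c) =
      (PySem.Dict.mk (rem.items.filter (fun q => !(l.map (·.1)).contains q.1)),
       u ++ (l.filter (fun p => !rem.contains p.1 && p.2 != 0)).map (fun p => (p.1, -p.2)),
       c ++ (l.filter (fun p => rem.contains p.1 && rem.getD p.1 0 != p.2)).map
            (fun p => (p.1, rem.getD p.1 0 - p.2))) := by
  induction l generalizing rem u c with
  | nil =>
    simp only [List.foldl_nil, List.map_nil, List.filter_nil, List.map_nil, List.append_nil]
    refine Prod.ext ?_ rfl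
    apply PySem.Dict.ext
    simp
  | cons p l ih =>
    have hn2 : (p.1 :: l.map (·.1)).Nodup := by simpa using hn
    have hn' : (l.map (·.1)).Nodup := hn2.of_cons
    have hne : p.1 ∉ l.map (·.1) := (List.nodup_cons.mp hn2).1
    have hql : ∀ q ∈ l, q.1 ≠ p.1 := by
      intro q hq he; exact hne (he ▸ List.mem_map_of_mem hq)
    simp only [List.foldl_cons, List.filter_cons, List.map_cons]
    cases hget : rem.get? p.1 with
    | none =>
      have hc : rem.contains p.1 = false := by
        rw [PySem.Dict.contains_eq_isSome_get?, hget]; rfl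
      have hpk : p.1 ∉ rem.keys := (PySem.Dict.get?_eq_none_iff_not_mem_keys rem p.1).mp hget
      have hfilt : ∀ q ∈ rem.items,
          (!(p.1 :: l.map (·.1)).contains q.1) = (!(l.map (·.1)).contains q.1) := by
        intro q hq
        have : q.1 ≠ p.1 := by
          intro he; exact hpk (he ▸ PySem.Dict.mem_keys_of_mem_items rem hq)
        simp [List.contains_cons, this]
      have hrem : PySem.Dict.mk (rem.items.filter (fun q => !(l.map (·.1)).contains q.1))
          = PySem.Dict.mk (rem.items.filter (fun q => !(p.1 :: l.map (·.1)).contains q.1)) := by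
        apply PySem.Dict.ext
        simp only
        exact (List.filter_congr hfilt).symm
      simp only [pvStep, hget, hc]
      by_cases hz : p.2 ≠ 0
      · rw [if_pos hz, ih hn']
        have : (p.2 != 0) = true := by simpa using hz
        simp only [Bool.not_false, Bool.true_and, this, if_pos, hrem]
        simp [List.append_assoc]
      · rw [if_neg hz, ih hn']
        have : (p.2 != 0) = false := by simpa using hz
        simp only [Bool.not_false, Bool.true_and, this, Bool.false_eq_true, if_neg, hrem]
        simp
    | some r =>
      have hc : rem.contains p.1 = true := by
        rw [PySem.Dict.contains_eq_isSome_get?, hget]; rfl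
      have hgd : rem.getD p.1 0 = r := by
        rw [PySem.Dict.getD_eq_get?_getD, hget]; rfl
      have hcl : ∀ q ∈ l, (rem.erase p.1).contains q.1 = rem.contains q.1 :=
        fun q hq => contains_erase_of_ne rem p.1 q.1 (hql q hq)
      have hgl : ∀ q ∈ l, (rem.erase p.1).getD q.1 0 = rem.getD q.1 0 :=
        fun q hq => getD_erase_of_ne rem p.1 q.1 0 (hql q hq)
      have hWrap : ∀ (u' c' : List (String × Int)),
          l.foldl pvStep (rem.erase p.1, u', c') =
            (PySem.Dict.mk (rem.items.filter (fun q => !(p.1 :: l.map (·.1)).contains q.1)),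
             u' ++ (l.filter (fun p => !rem.contains p.1 && p.2 != 0)).map (fun p => (p.1, -p.2)),
             c' ++ (l.filter (fun p => rem.contains p.1 && rem.getD p.1 0 != p.2)).map
                  (fun p => (p.1, rem.getD p.1 0 - p.2))) := by
        intro u' c'
        rw [ih hn']
        refine Prod.ext ?_ (Prod.ext ?_ ?_)
        · apply PySem.Dict.ext
          show ((rem.erase p.1).items.filter _) = _
          have : (rem.erase p.1).items = rem.items.filter (fun q => !(q.1 == p.1)) := rfl
          rw [this, List.filter_filter]
          apply List.filter_congr
          intro q _
          simp [List.contains_cons, Bool.not_or, Bool.and_comm]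
        · simp only
          congr 1
          rw [List.filter_congr (fun q hq => by rw [hcl q hq])]
        · simp only
          congr 1
          rw [List.filter_congr (fun q hq => by rw [hcl q hq, hgl q hq])]
          apply List.map_congr_left
          intro q hq
          rw [hgl q (List.mem_filter.mp hq).1]
      simp only [pvStep, hget]
      by_cases hr : r ≠ p.2
      · rw [if_pos hr]
        rw [hWrap]
        have h1 : (rem.getD p.1 0 != p.2) = true := by simpa [hgd] using hr
        simp [hc, h1, hgd, List.append_assoc, hr]
      · rw [if_neg hr]
        rw [hWrap]
        have h1 : (rem.getD p.1 0 != p.2) = false := by simpa [hgd] using hr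
        simp [hc, h1]

lemma decide_mem_map_fst (l : List (String × Int)) (a : String) :
    decide (a ∈ l.map (·.1)) = l.any fun q => decide (q.1 = a) := by
  rw [Bool.eq_iff_iff]
  simp only [decide_eq_true_eq, List.any_eq_true, List.mem_map]

lemma filter_map_congr (l : List (String × Int)) (q q' : (String × Int) → Bool)
    (g g' : (String × Int) → String × Int)
    (hq : ∀ p ∈ l, q p = q' p) (hg : ∀ p ∈ l, g p = g' p) :
    (l.filter q).map g = (l.filter q').map g' := by
  rw [List.filter_congr hq]
  exact List.map_congr_left (fun p hp => hg p (List.mem_filter.mp hp).1)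

lemma reconcile_agree (pos_dict_1 pos_dict_2 : List (String × Int))
    (h1 : (pos_dict_1.map (·.1)).Nodup) (h2 : (pos_dict_2.map (·.1)).Nodup) :
    reconcile_positions_2 pos_dict_1 pos_dict_2 = reconcile_positions_2_alt pos_dict_1 pos_dict_2 := by
  have hgetD1 : ∀ p ∈ pos_dict_1, (PySem.Dict.mk pos_dict_1).getD p.1 0 = p.2 := by
    intro p hp
    exact PySem.Dict.getD_of_mem_items _ (by simpa using hp) (by simpa [PySem.Dict.keys_mk] using h1) 0
  have hgetD2 : ∀ p ∈ pos_dict_2, (PySem.Dict.mk pos_dict_2).getD p.1 0 = p.2 := by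
    intro p hp
    exact PySem.Dict.getD_of_mem_items _ (by simpa using hp) (by simpa [PySem.Dict.keys_mk] using h2) 0
  -- A side -----------------------------------------------------------------
  have hA : reconcile_positions_2 pos_dict_1 pos_dict_2
      = (((pos_dict_1.map (·.1)).filter (fun x => !(pos_dict_2.map (·.1)).contains x)).filter
            (fun k => decide ((PySem.Dict.mk pos_dict_1).getD k 0 * (-1) ≠ 0))).map
            (fun k => (k, (PySem.Dict.mk pos_dict_1).getD k 0 * (-1)))
        ++ (((pos_dict_1.map (·.1)).filter (fun x => (pos_dict_2.map (·.1)).contains x)).filter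
            (fun k => decide ((PySem.Dict.mk pos_dict_2).getD k 0 - (PySem.Dict.mk pos_dict_1).getD k 0 ≠ 0))).map
            (fun k => (k, (PySem.Dict.mk pos_dict_2).getD k 0 - (PySem.Dict.mk pos_dict_1).getD k 0))
        ++ (((pos_dict_2.map (·.1)).filter (fun x => !(pos_dict_1.map (·.1)).contains x)).filter
            (fun k => decide ((PySem.Dict.mk pos_dict_2).getD k 0 ≠ 0))).map
            (fun k => (k, (PySem.Dict.mk pos_dict_2).getD k 0)) := by
    simp only [reconcile_positions_2, PySem.Dict.keys_mk]
    rw [PySem.Set.ofList_eq_self_of_nodup _ h1, PySem.Set.ofList_eq_self_of_nodup _ h2]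
    simp only [PySem.Set.diff, PySem.Set.inter]
    simp only [PySem.Set.contains]
    have hndL : ((pos_dict_1.map (·.1)).filter (fun x => !(pos_dict_2.map (·.1)).contains x)).Nodup := h1.filter _
    have hndM : ((pos_dict_1.map (·.1)).filter (fun x => (pos_dict_2.map (·.1)).contains x)).Nodup := h1.filter _
    have hndR : ((pos_dict_2.map (·.1)).filter (fun x => !(pos_dict_1.map (·.1)).contains x)).Nodup := h2.filter _
    have freshL : ∀ k ∈ (pos_dict_1.map (·.1)).filter (fun x => !(pos_dict_2.map (·.1)).contains x),
        (PySem.Dict.empty : PySem.Dict String Int).contains k = false :=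
      fun k _ => PySem.Dict.contains_empty _
    have freshM : ∀ k ∈ (pos_dict_1.map (·.1)).filter (fun x => (pos_dict_2.map (·.1)).contains x),
        (((pos_dict_1.map (·.1)).filter (fun x => !(pos_dict_2.map (·.1)).contains x)).foldl
          (fun res k => if (PySem.Dict.mk pos_dict_1).getD k 0 * (-1) ≠ 0 then
            res.insert k ((PySem.Dict.mk pos_dict_1).getD k 0 * (-1)) else res)
          PySem.Dict.empty).contains k = false := by
      intro k hk
      rw [contains_foldl_insertIf _ _ _ hndL freshL]
      have := (List.mem_filter.mp hk).2
      simp only [PySem.Dict.contains_empty, Bool.false_or, decide_eq_false_iff_not]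
      intro hmem
      have h' := (List.mem_filter.mp (List.mem_filter.mp hmem).1).2
      simp_all
    have freshR : ∀ k ∈ (pos_dict_2.map (·.1)).filter (fun x => !(pos_dict_1.map (·.1)).contains x),
        ((((pos_dict_1.map (·.1)).filter (fun x => (pos_dict_2.map (·.1)).contains x))).foldl
          (fun res k => if (PySem.Dict.mk pos_dict_2).getD k 0 - (PySem.Dict.mk pos_dict_1).getD k 0 ≠ 0 then
            res.insert k ((PySem.Dict.mk pos_dict_2).getD k 0 - (PySem.Dict.mk pos_dict_1).getD k 0) else res)
          (((pos_dict_1.map (·.1)).filter (fun x => !(pos_dict_2.map (·.1)).contains x)).foldl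
            (fun res k => if (PySem.Dict.mk pos_dict_1).getD k 0 * (-1) ≠ 0 then
              res.insert k ((PySem.Dict.mk pos_dict_1).getD k 0 * (-1)) else res)
            PySem.Dict.empty)).contains k = false := by
      intro k hk
      rw [contains_foldl_insertIf _ _ _ hndM freshM, contains_foldl_insertIf _ _ _ hndL freshL]
      have hk1 : k ∉ pos_dict_1.map (·.1) := by
        have := (List.mem_filter.mp hk).2
        simpa [List.contains_iff_mem] using this
      simp only [PySem.Dict.contains_empty, Bool.false_or, Bool.or_eq_false_iff,
        decide_eq_false_iff_not]
      constructor <;> intro hmem <;>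
        exact hk1 (List.mem_filter.mp (List.mem_filter.mp hmem).1).1
    rw [items_foldl_insertIf _ _ _ hndR freshR, items_foldl_insertIf _ _ _ hndM freshM,
      items_foldl_insertIf _ _ _ hndL freshL]
    simp [List.append_assoc]
    rfl
  -- B side -----------------------------------------------------------------
  have hB : reconcile_positions_2_alt pos_dict_1 pos_dict_2
      = (pos_dict_1.filter (fun p => !(PySem.Dict.mk pos_dict_2).contains p.1 && p.2 != 0)).map
          (fun p => (p.1, -p.2))
        ++ (pos_dict_1.filter (fun p => (PySem.Dict.mk pos_dict_2).contains p.1 &&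
              ((PySem.Dict.mk pos_dict_2).getD p.1 0 - p.2) != 0)).map
          (fun p => (p.1, (PySem.Dict.mk pos_dict_2).getD p.1 0 - p.2))
        ++ pos_dict_2.filter (fun p => !(PySem.Dict.mk pos_dict_1).contains p.1 && p.2 != 0) := by
    simp only [reconcile_positions_2_alt]
    rw [b_fold pos_dict_1 h1 (PySem.Dict.mk pos_dict_2) [] []]
    simp only [List.nil_append]
    -- name the three blocks
    have eC : (pos_dict_1.filter (fun p => (PySem.Dict.mk pos_dict_2).contains p.1 &&
            (PySem.Dict.mk pos_dict_2).getD p.1 0 != p.2)).map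
          (fun p => (p.1, (PySem.Dict.mk pos_dict_2).getD p.1 0 - p.2))
        = (pos_dict_1.filter (fun p => (PySem.Dict.mk pos_dict_2).contains p.1 &&
            ((PySem.Dict.mk pos_dict_2).getD p.1 0 - p.2) != 0)).map
          (fun p => (p.1, (PySem.Dict.mk pos_dict_2).getD p.1 0 - p.2)) := by
      apply filter_map_congr
      · intro p _
        have : ((PySem.Dict.mk pos_dict_2).getD p.1 0 != p.2)
            = (((PySem.Dict.mk pos_dict_2).getD p.1 0 - p.2) != 0) := by
          rw [Bool.eq_iff_iff]
          simp [sub_ne_zero]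
        rw [this]
      · intro p _; rfl
    have eS : ((PySem.Dict.mk (((PySem.Dict.mk pos_dict_2).items).filter
            (fun q => !(pos_dict_1.map (·.1)).contains q.1))).items.filter (fun p => p.2 != 0))
        = pos_dict_2.filter (fun p => !(PySem.Dict.mk pos_dict_1).contains p.1 && p.2 != 0) := by
      show ((pos_dict_2.filter (fun q => !(pos_dict_1.map (·.1)).contains q.1)).filter
          (fun p => p.2 != 0)) = _
      rw [List.filter_filter]
      apply List.filter_congr
      intro p _
      rw [contains_mk_eq_contains_keys]
      rw [Bool.eq_iff_iff]
      simp [and_comm]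
    rw [eC, eS]
    -- collapse the final dict(...) over fresh distinct keys
    set U := (pos_dict_1.filter (fun p => !(PySem.Dict.mk pos_dict_2).contains p.1 && p.2 != 0)).map
        (fun p => (p.1, -p.2)) with hU
    set C := (pos_dict_1.filter (fun p => (PySem.Dict.mk pos_dict_2).contains p.1 &&
          ((PySem.Dict.mk pos_dict_2).getD p.1 0 - p.2) != 0)).map
        (fun p => (p.1, (PySem.Dict.mk pos_dict_2).getD p.1 0 - p.2)) with hC
    set S := pos_dict_2.filter (fun p => !(PySem.Dict.mk pos_dict_1).contains p.1 && p.2 != 0) with hS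
    have hUk : U.map (·.1) = (pos_dict_1.filter
        (fun p => !(PySem.Dict.mk pos_dict_2).contains p.1 && p.2 != 0)).map (·.1) := by
      rw [hU, List.map_map]; rfl
    have hCk : C.map (·.1) = (pos_dict_1.filter (fun p => (PySem.Dict.mk pos_dict_2).contains p.1 &&
          ((PySem.Dict.mk pos_dict_2).getD p.1 0 - p.2) != 0)).map (·.1) := by
      rw [hC, List.map_map]; rfl
    have hUk1 : ∀ x ∈ U.map (·.1), x ∈ pos_dict_1.map (·.1) ∧
        (PySem.Dict.mk pos_dict_2).contains x = false := by
      intro x hx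
      rw [hUk] at hx
      obtain ⟨p, hp, rfl⟩ := List.mem_map.mp hx
      obtain ⟨hp1, hp2⟩ := List.mem_filter.mp hp
      simp only [Bool.and_eq_true, Bool.not_eq_true'] at hp2
      exact ⟨List.mem_map_of_mem hp1, hp2.1⟩
    have hCk1 : ∀ x ∈ C.map (·.1), x ∈ pos_dict_1.map (·.1) ∧
        (PySem.Dict.mk pos_dict_2).contains x = true := by
      intro x hx
      rw [hCk] at hx
      obtain ⟨p, hp, rfl⟩ := List.mem_map.mp hx
      obtain ⟨hp1, hp2⟩ := List.mem_filter.mp hp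
      simp only [Bool.and_eq_true] at hp2
      exact ⟨List.mem_map_of_mem hp1, hp2.1⟩
    have hSk1 : ∀ x ∈ S.map (·.1), x ∉ pos_dict_1.map (·.1) := by
      intro x hx
      rw [hS] at hx
      obtain ⟨p, hp, rfl⟩ := List.mem_map.mp hx
      have := (List.mem_filter.mp hp).2
      simp only [Bool.and_eq_true, Bool.not_eq_true'] at this
      rw [contains_mk_eq_contains_keys] at this
      simpa [List.contains_iff_mem] using this.1
    have hndU : (U.map (·.1)).Nodup := by
      rw [hUk]; exact List.Nodup.sublist (List.Sublist.map _ List.filter_sublist) h1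
    have hndC : (C.map (·.1)).Nodup := by
      rw [hCk]; exact List.Nodup.sublist (List.Sublist.map _ List.filter_sublist) h1
    have hndS : (S.map (·.1)).Nodup := by
      rw [hS]; exact List.Nodup.sublist (List.Sublist.map _ List.filter_sublist) h2
    have hkeys : ((U ++ C ++ S).map (·.1)).Nodup := by
      simp only [List.map_append]
      rw [List.nodup_append, List.nodup_append]
      refine ⟨⟨hndU, hndC, ?_⟩, hndS, ?_⟩
      · intro x hxU y hyC he
        subst he
        have hu := (hUk1 x hxU).2
        have hc := (hCk1 x hyC).2
        simp_all
      · intro x hx y hyS he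
        subst he
        rcases List.mem_append.mp hx with hxU | hxC
        · exact hSk1 x hyS (hUk1 x hxU).1
        · exact hSk1 x hyS (hCk1 x hxC).1
    rw [PySem.Dict.ofList, items_update_fresh _ _ (fun a _ => PySem.Dict.contains_empty _) hkeys]
    rfl
  rw [hA, hB]
  congr 1
  · congr 1
    · -- left block
      rw [List.filter_filter, List.filter_map, List.map_map]
      apply filter_map_congr
      · intro p hp
        simp [Function.comp, contains_mk_eq_contains_keys, hgetD1 p hp, decide_mem_map_fst, bne, Bool.beq_eq_decide_eq, Bool.and_comm]
      · intro p hp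
        simp [Function.comp, hgetD1 p hp]
    · -- middle block
      rw [List.filter_filter, List.filter_map, List.map_map]
      apply filter_map_congr
      · intro p hp
        simp [Function.comp, contains_mk_eq_contains_keys, hgetD1 p hp, decide_mem_map_fst, bne, Bool.beq_eq_decide_eq, Bool.and_comm]
      · intro p hp
        simp [Function.comp, hgetD1 p hp]
  · -- right block
    rw [List.filter_filter, List.filter_map, List.map_map]
    have : pos_dict_2.filter (fun p => !(PySem.Dict.mk pos_dict_1).contains p.1 && p.2 != 0)
        = (pos_dict_2.filter (fun p => !(PySem.Dict.mk pos_dict_1).contains p.1 && p.2 != 0)).map id := by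
      simp
    rw [this]
    apply filter_map_congr
    · intro p hp
      simp [Function.comp, contains_mk_eq_contains_keys, hgetD2 p hp, decide_mem_map_fst, bne, Bool.beq_eq_decide_eq, Bool.and_comm]
    · intro p hp
      simp [Function.comp, hgetD2 p hp]

-- ===== VERDICT (by name: the statement is the Claim_ definition above) =====
theorem reconcile_positions_2_spec : Claim_equal_reconcile_positions_2 := by
  intro pos_dict_1 pos_dict_2 _hdom hpre
  unfold Pre_reconcile_positions_2 at hpre
  unfold Spec_reconcile_positions_2
  exact reconcile_agree pos_dict_1 pos_dict_2 hpre.1 hpre.2
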